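-- pv_equiv track=rewrite | github.com/nhandzai/Gem-hunter | myCnf.py | simplify_function
-- ===== SOURCE A (Python) =====
-- def simplify_function(cnf):
--     new_cnf = []
--     unit_clause = []
--     for clause1 in cnf:
--         keep_clause = True
--         for clause2 in cnf:
--               if clause1 != clause2 and set(clause1) >= set(clause2):
--                 keep_clause = False
--                 break
--         if keep_clause:
--             new_cnf.append(clause1)
--             if len(clause1) == 1:
--                 unit_clause.append(clause1[0])
--     new_cnfs = []
--     for clause in cnf:
--             new_clause=[]
--             for literal in clause:
--                 if literal in unit_clause :
--                     new_clause=None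
--                     break
--                 if -literal in unit_clause:
--                     continue
--                 new_clause.append(literal)
--             if new_clause != None:
--                 new_cnfs.append(new_clause)
--     return new_cnfs,unit_clause
-- ===== SOURCE B (Python) =====
-- def simplify_function(cnf):
--     # Phase 1: sort clause/set pairs by ascending set size; a clause is subsumed
--     # iff some value-distinct clause's set is a subset of its set, and any such
--     # witness has an equal-or-smaller set, so the scan can stop at the first
--     # larger set.
--     by_size = sorted(((frozenset(c), c) for c in cnf), key=lambda p: len(p[0]))
--
--     def subsumed(c, s):
--         for s2, c2 in by_size:
--             if len(s2) > len(s):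
--                 return False
--             if c2 != c and s2 <= s:
--                 return True
--         return False
--
--     kept = [c for c in cnf if not subsumed(c, frozenset(c))]
--     unit_clause = [c[0] for c in kept if len(c) == 1]
--
--     # Phase 2 over the ORIGINAL cnf: drop a clause containing a unit literal,
--     # otherwise strip literals whose negation is a unit.
--     units = set(unit_clause)
--     negs = {-u for u in unit_clause}
--     new_cnfs = [[l for l in c if l not in negs]
--                 for c in cnf if not any(l in units for l in c)]
--     return new_cnfs, unit_clause
-- ===== Notes on version B (the rewrite author's own statement) =====
-- stated objective: faster
-- what changed: Phase 1's all-pairs subsumption scan is replaced by sorting clause/frozenset pairs by ascending set size and scanning each clause only until the first larger set (a subset witness cannot be larger), with precomputed frozensets; unit-literal and negated-unit membership tests use hash sets instead of repeated list scans, and both phases are filter/map passes instead of nested loops with break flags.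
import Mathlib
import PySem

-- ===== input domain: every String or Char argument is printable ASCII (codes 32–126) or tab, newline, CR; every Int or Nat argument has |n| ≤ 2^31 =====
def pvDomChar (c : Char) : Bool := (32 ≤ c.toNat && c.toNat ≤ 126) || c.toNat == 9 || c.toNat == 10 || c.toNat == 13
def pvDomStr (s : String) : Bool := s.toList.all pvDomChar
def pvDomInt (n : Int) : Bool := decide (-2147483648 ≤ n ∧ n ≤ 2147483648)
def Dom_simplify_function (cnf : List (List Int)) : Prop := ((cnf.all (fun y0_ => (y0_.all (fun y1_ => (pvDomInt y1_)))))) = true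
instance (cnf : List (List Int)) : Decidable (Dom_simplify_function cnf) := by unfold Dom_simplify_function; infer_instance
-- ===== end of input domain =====

-- B replaces A's all-pairs subsumption scan by a sort-by-set-size scan with an early cutoff,
-- set-based unit lookups, and a filter/map phase 2 (objective: faster; measured).

-- ===== PORT A =====
-- set(clause1) >= set(clause2)
def pySupersetOf (c1 c2 : List Int) : Bool := c2.all (fun x => c1.contains x)

-- the inner 'for literal in clause' loop of phase 2 (None = the clause is dropped)
def pyBuildClause (unit : List Int) : List Int → Option (List Int)
  | [] => some []
  | l :: ls =>
    if unit.contains l then none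
    else if unit.contains (-l) then pyBuildClause unit ls
    else (pyBuildClause unit ls).map (fun nc => l :: nc)

def simplify_function (cnf : List (List Int)) : List (List Int) × List Int :=
  -- first loop: new_cnf / unit_clause accumulators (break via List.any)
  let phase1 := cnf.foldl (fun (acc : List (List Int) × List Int) c1 =>
    if cnf.any (fun c2 => decide (c1 ≠ c2) && pySupersetOf c1 c2) then acc
    else (acc.1 ++ [c1],
          -- clause1[0] under the guard len(clause1) == 1: headD is exact here
          if c1.length == 1 then acc.2 ++ [c1.headD 0] else acc.2)) ([], [])
  let unit_clause := phase1.2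
  -- second loop over the original cnf
  let new_cnfs := cnf.foldl (fun acc clause =>
    match pyBuildClause unit_clause clause with
    | none => acc
    | some nc => acc ++ [nc]) []
  (new_cnfs, unit_clause)

-- ===== PORT B =====
-- sorted(((frozenset(c), c) for c in cnf), key=lambda p: len(p[0]))
def bBySize (cnf : List (List Int)) : List (PySem.Set Int × List Int) :=
  PySem.List.sorted (cnf.map (fun c => (PySem.Set.ofList c, c))) (fun p => p.1.length) false

-- the early-exit scan over the size-sorted pairs
def bSubsumed (c : List Int) (s : PySem.Set Int) : List (PySem.Set Int × List Int) → Bool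
  | [] => false
  | (s2, c2) :: rest =>
    if s2.length > s.length then false
    else if decide (c2 ≠ c) && PySem.Set.issubset s2 s then true
    else bSubsumed c s rest

def simplify_function_alt (cnf : List (List Int)) : List (List Int) × List Int :=
  let by_size := bBySize cnf
  let kept := cnf.filter (fun c => !bSubsumed c (PySem.Set.ofList c) by_size)
  let unit_clause := (kept.filter (fun c => c.length == 1)).map (fun c => c.headD 0)
  let units := PySem.Set.ofList unit_clause
  let negs := PySem.Set.ofList (unit_clause.map (fun u => -u))
  let new_cnfs := (cnf.filter (fun c => !c.any (fun l => PySem.Set.contains units l))).map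
      (fun c => c.filter (fun l => !PySem.Set.contains negs l))
  (new_cnfs, unit_clause)

-- ===== PRECONDITION & SPEC =====
def Spec_simplify_function (cnf : List (List Int)) (out : List (List Int) × List Int) : Prop := out = simplify_function_alt cnf
instance (cnf : List (List Int)) (out : List (List Int) × List Int) : Decidable (Spec_simplify_function cnf out) := by unfold Spec_simplify_function; infer_instance

-- ===== CLAIM (what is proved, stated in full; the proofs are below) =====
def Claim_equal_simplify_function : Prop := ∀ (cnf : List (List Int)), Dom_simplify_function cnf → Spec_simplify_function cnf (simplify_function cnf)


-- ===== LEMMAS AND PROOFS =====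

-- a nodup subset cannot be longer than its superset
lemma subset_len_le (s2 s : PySem.Set Int) (h2 : s2.Nodup)
    (hs : PySem.Set.issubset s2 s = true) : s2.length ≤ s.length := by
  refine List.Subperm.length_le (List.subperm_of_subset h2 ?_)
  intro x hx
  simp only [PySem.Set.issubset, List.all_eq_true] at hs
  simpa using hs x hx

-- the early-exit scan equals an unrestricted 'any' on a size-sorted list of nodup sets
lemma bSubsumed_eq_any (c : List Int) (s : PySem.Set Int)
    (L : List (PySem.Set Int × List Int))
    (hsorted : L.Pairwise (fun a b => a.1.length ≤ b.1.length))
    (hof : ∀ p ∈ L, p.1.Nodup) :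
    bSubsumed c s L = L.any (fun p => decide (p.2 ≠ c) && PySem.Set.issubset p.1 s) := by
  induction L with
  | nil => rfl
  | cons p rest ih =>
    obtain ⟨s2, c2⟩ := p
    rcases List.pairwise_cons.mp hsorted with ⟨hhead, htail⟩
    by_cases hgt : s2.length > s.length
    · have hall : rest.any (fun p => decide (p.2 ≠ c) && PySem.Set.issubset p.1 s) = false := by
        cases hb : rest.any (fun p => decide (p.2 ≠ c) && PySem.Set.issubset p.1 s) with
        | false => rfl
        | true =>
          exfalso
          rcases List.any_eq_true.mp hb with ⟨q, hq, hpq⟩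
          have hsub : PySem.Set.issubset q.1 s = true := (Bool.and_eq_true_iff.mp hpq).2
          have hl := subset_len_le q.1 s (hof q (List.mem_cons_of_mem _ hq)) hsub
          have hh : s2.length ≤ q.1.length := by simpa using hhead q hq
          omega
      have hself : PySem.Set.issubset s2 s = false := by
        cases hsub : PySem.Set.issubset s2 s with
        | false => rfl
        | true =>
          have := subset_len_le s2 s (hof (s2, c2) List.mem_cons_self) hsub
          omega
      simp only [bSubsumed, List.any_cons]
      rw [if_pos hgt, hself, hall]
      simp
    · show (if s2.length > s.length then false
        else if decide (c2 ≠ c) && PySem.Set.issubset s2 s then true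
        else bSubsumed c s rest) = _
      rw [if_neg hgt, ih htail (fun q hq => hof q (List.mem_cons_of_mem _ hq))]
      cases hc : (decide (c2 ≠ c) && PySem.Set.issubset s2 s) with
      | true => rw [if_pos rfl, List.any_cons, hc, Bool.true_or]
      | false =>
        rw [if_neg (hc ▸ Bool.false_ne_true), List.any_cons, hc, Bool.false_or]

-- issubset on ofList sets is A's value-level superset test
lemma issubset_ofList (c c2 : List Int) :
    PySem.Set.issubset (PySem.Set.ofList c2) (PySem.Set.ofList c) = pySupersetOf c c2 := by
  rw [Bool.eq_iff_iff]
  simp [pysem, PySem.Set.issubset, pySupersetOf, List.all_eq_true]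

-- B's subsumption test equals A's inner any-loop
lemma bSubsumed_spec (cnf : List (List Int)) (c : List Int) :
    bSubsumed c (PySem.Set.ofList c) (bBySize cnf)
      = cnf.any (fun c2 => decide (c ≠ c2) && pySupersetOf c c2) := by
  have hperm : (bBySize cnf).Perm (cnf.map (fun c => (PySem.Set.ofList c, c))) :=
    PySem.List.sorted_perm _ _ _
  rw [bSubsumed_eq_any c (PySem.Set.ofList c) (bBySize cnf)
      (PySem.List.sorted_pairwise _ _)
      (by
        intro p hp
        rcases List.mem_map.mp (hperm.mem_iff.mp hp) with ⟨c2, _, rfl⟩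
        exact PySem.Set.nodup_ofList c2)]
  rw [List.Perm.any_eq hperm, List.any_map]
  have hfun : ((fun p : PySem.Set Int × List Int => decide (p.2 ≠ c) && PySem.Set.issubset p.1 (PySem.Set.ofList c))
      ∘ (fun c2 => (PySem.Set.ofList c2, c2)))
      = (fun c2 => decide (c ≠ c2) && pySupersetOf c c2) := by
    funext c2
    simp only [Function.comp, issubset_ofList]
    congr 1
    simp [ne_comm]
  rw [hfun]

-- A's first loop, characterised as filter/map
lemma phase1_eq (P : List Int → Bool) (l : List (List Int)) (a : List (List Int)) (u : List Int) :
    l.foldl (fun (acc : List (List Int) × List Int) c1 =>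
      if P c1 then acc
      else (acc.1 ++ [c1], if c1.length == 1 then acc.2 ++ [c1.headD 0] else acc.2)) (a, u)
    = (a ++ l.filter (fun c => !P c),
       u ++ ((l.filter (fun c => !P c)).filter (fun c => c.length == 1)).map (fun c => c.headD 0)) := by
  induction l generalizing a u with
  | nil => simp
  | cons c l ih =>
    rw [List.foldl_cons]
    by_cases hp : P c = true
    · rw [if_pos hp, ih]
      have h' : (!P c) = false := by simp [hp]
      simp [h']
    · have hp' : (!P c) = true := by simp [hp]
      rw [if_neg hp, ih]
      by_cases h1 : (c.length == 1) = true
      · simp [hp', h1]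
      · have h1' : (c.length == 1) = false := Bool.eq_false_iff.mpr h1
        simp [hp', h1']

-- A's inner phase-2 loop, characterised by any/filter
lemma pyBuildClause_eq (u : List Int) (c : List Int) :
    pyBuildClause u c
      = if c.any (fun l => u.contains l) then none
        else some (c.filter (fun l => !u.contains (-l))) := by
  induction c with
  | nil => simp [pyBuildClause]
  | cons l ls ih =>
    by_cases h : l ∈ u
    · simp [pyBuildClause, h]
    · by_cases hn : (-l) ∈ u
      · simp [pyBuildClause, h, hn, ih]
      · by_cases ha : ∃ x ∈ ls, x ∈ u
        · simp [pyBuildClause, h, hn, ih, ha]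
        · simp [pyBuildClause, h, hn, ih, ha]

-- A's second loop, characterised as filter/map
lemma phase2_eq (u : List Int) (l : List (List Int)) (a : List (List Int)) :
    l.foldl (fun acc clause =>
      match pyBuildClause u clause with
      | none => acc
      | some nc => acc ++ [nc]) a
    = a ++ (l.filter (fun c => !c.any (fun x => u.contains x))).map
        (fun c => c.filter (fun x => !u.contains (-x))) := by
  induction l generalizing a with
  | nil => simp
  | cons c l ih =>
    rw [List.foldl_cons, pyBuildClause_eq]
    by_cases h : ∃ x ∈ c, x ∈ u
    · rw [if_pos (by simpa using h), ih]
      simp [h]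
    · rw [if_neg (by simpa using h), ih]
      have h' : ∀ x ∈ c, x ∉ u := by simpa using h
      simp only [List.filter_cons]
      rw [if_pos (by simpa using h' : (!c.any fun x => u.contains x) = true), List.map_cons]
      simp

-- membership through Set.ofList, as Bool
lemma contains_ofList (l : List Int) (x : Int) :
    PySem.Set.contains (PySem.Set.ofList l) x = l.contains x := by
  simp [pysem]

lemma contains_map_neg (u : List Int) (x : Int) :
    (u.map (fun v => -v)).contains x = u.contains (-x) := by
  rw [Bool.eq_iff_iff]
  simp [pysem]

-- ===== VERDICT (by name: the statement is the Claim_ definition above) =====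
theorem simplify_function_spec : Claim_equal_simplify_function := by
  intro cnf _
  unfold Spec_simplify_function
  simp only [simplify_function, simplify_function_alt]
  have hP : (fun c => !bSubsumed c (PySem.Set.ofList c) (bBySize cnf))
      = (fun c => !cnf.any (fun c2 => decide (c ≠ c2) && pySupersetOf c c2)) := by
    funext c
    rw [bSubsumed_spec]
  rw [phase1_eq, phase2_eq, hP]
  simp only [List.nil_append, contains_ofList, contains_map_neg]
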